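-- pv_equiv track=rewrite | github.com/JasonLee-p/pyPCS | pyPCS/series/funcs.py | to_pc_set
-- ===== SOURCE A (Python) =====
-- def to_pc_set(pitch_group, ordered=False):
--     cns = []
--     if ordered is False:
--         for pitch in pitch_group:
--             pitch_set = pitch % 12
--             if pitch_set in cns:
--                 continue
--             else:
--                 cns.append(pitch_set)
--         return cns
--     else:
--         result = list([pitch % 12 for pitch in pitch_group])
--         return result
-- ===== SOURCE B (Python) =====
-- def to_pc_set(pitch_group, ordered=False):
--     if ordered is False:
--         return _dedup_rec([p % 12 for p in pitch_group])
--     return [p % 12 for p in pitch_group]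
--
-- def _dedup_rec(classes):
--     # head-and-filter recursion: keep the head, drop all later equal classes, recurse
--     if not classes:
--         return []
--     h = classes[0]
--     return [h] + _dedup_rec([x for x in classes[1:] if x != h])
-- ===== Notes on version B (the rewrite author's own statement) =====
-- stated objective: alternative
-- what changed: A's single interleaved loop with a membership scan over the accumulator is replaced by a map pass followed by a head-and-filter recursion (keep the first class, filter out all later equal classes, recurse) that keeps no accumulator and does no membership test.
import Mathlib
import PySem

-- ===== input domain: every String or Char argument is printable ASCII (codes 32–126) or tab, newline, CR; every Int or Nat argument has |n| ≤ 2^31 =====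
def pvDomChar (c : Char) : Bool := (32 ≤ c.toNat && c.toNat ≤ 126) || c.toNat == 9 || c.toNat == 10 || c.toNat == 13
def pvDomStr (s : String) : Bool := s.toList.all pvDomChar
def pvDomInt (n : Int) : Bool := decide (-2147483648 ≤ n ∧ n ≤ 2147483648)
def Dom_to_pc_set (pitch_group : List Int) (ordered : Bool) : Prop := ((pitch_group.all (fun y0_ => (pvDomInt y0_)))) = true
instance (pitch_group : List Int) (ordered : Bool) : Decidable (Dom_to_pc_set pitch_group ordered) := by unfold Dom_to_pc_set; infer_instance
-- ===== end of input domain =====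

-- B replaces A's interleaved accumulator-with-membership-scan loop by a map pass plus a head-and-filter recursion (no membership test): alternative decomposition.


-- ===== PORT A =====
-- A: one loop mapping each pitch mod 12 and appending unless already present in the accumulator
def to_pc_set (pitch_group : List Int) (ordered : Bool) : List Int :=
  if ordered = false then
    pitch_group.foldl (fun cns pitch =>
      let pitch_set := PySem.Int.mod pitch 12
      if pitch_set ∈ cns then cns else cns ++ [pitch_set]) []
  else
    pitch_group.map (fun pitch => PySem.Int.mod pitch 12)

-- ===== PORT B =====
-- B helper: head-and-filter recursion (keep head, filter out later equal elements, recurse)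
def dedup_rec : List Int → List Int
  | [] => []
  | h :: t => h :: dedup_rec (t.filter (fun x => !(x == h)))
termination_by xs => xs.length
decreasing_by
  simp only [List.length_cons, Nat.lt_succ_iff, List.length_unattach]
  exact le_trans (List.length_filter_le _ _) (by simp)

def to_pc_set_alt (pitch_group : List Int) (ordered : Bool) : List Int :=
  if ordered = false then
    dedup_rec (pitch_group.map (fun p => PySem.Int.mod p 12))
  else
    pitch_group.map (fun p => PySem.Int.mod p 12)

-- ===== PRECONDITION & SPEC =====
def Spec_to_pc_set (pitch_group : List Int) (ordered : Bool) (out : List Int) : Prop := out = to_pc_set_alt pitch_group ordered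
instance (pitch_group : List Int) (ordered : Bool) (out : List Int) : Decidable (Spec_to_pc_set pitch_group ordered out) := by unfold Spec_to_pc_set; infer_instance

-- ===== CLAIM (what is proved, stated in full; the proofs are below) =====
def Claim_equal_to_pc_set : Prop := ∀ (pitch_group : List Int) (ordered : Bool), Dom_to_pc_set pitch_group ordered → Spec_to_pc_set pitch_group ordered (to_pc_set pitch_group ordered)

-- ===== LEMMAS AND PROOFS =====

-- A's dedup loop, generalized over its accumulator, equals the accumulator followed by
-- B's head-and-filter recursion on the not-yet-seen elements.
theorem foldl_eq_dedup_rec (xs : List Int) : ∀ cns : List Int,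
    xs.foldl (fun cns x => if x ∈ cns then cns else cns ++ [x]) cns
      = cns ++ dedup_rec (xs.filter (fun x => !(cns.contains x))) := by
  induction xs with
  | nil => intro cns; simp [dedup_rec.eq_1]
  | cons h t ih =>
    intro cns
    by_cases hmem : h ∈ cns
    · simp [List.foldl_cons, hmem, ih cns]
    · have hf : (h :: t).filter (fun x => !(cns.contains x))
          = h :: t.filter (fun x => !(cns.contains x)) := by
        simp [hmem]
      rw [hf, dedup_rec.eq_2]
      simp only [List.foldl_cons, if_neg hmem, ih (cns ++ [h])]
      rw [List.filter_filter, List.append_assoc, List.singleton_append]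
      congr 2
      congr 1
      apply List.filter_congr
      intro x _
      by_cases hx : x = h <;> by_cases hc : x ∈ cns <;>
        simp [hx, hc, List.contains_eq_mem, List.mem_append]

-- ===== VERDICT (by name: the statement is the Claim_ definition above) =====
theorem to_pc_set_spec : Claim_equal_to_pc_set := by
  intro pitch_group ordered _
  unfold Spec_to_pc_set to_pc_set to_pc_set_alt
  cases ordered
  · have := foldl_eq_dedup_rec (pitch_group.map (fun p => PySem.Int.mod p 12)) []
    simpa [List.foldl_map] using this
  · simp
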